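-- pv_equiv track=rewrite | github.com/Guorti/Dynamic-Programming-Solutions | Moda.py | Mode_Memoization_BottomUp
-- ===== SOURCE A (Python) =====
-- import pprint
--
-- def Mode_Memoization_BottomUp (S):
--     n = len (S)
--     M = [[0 for _ in range(n+1)] for _ in range(n+1)]
--     pprint.pprint(M)
--     for j in range (1, n+1):
--         for k in range (1, n+1):
--             if S[j-1] == S[k-1]:
--                 M[j][k] = M[j-1][k] + 1
--                 pprint.pprint(M)
--             else:
--                 M[j][k] = max(M[j-1][k-1], M[j-1][k])
--                 pprint.pprint(M)
--     return M[j][k]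
-- ===== SOURCE B (Python) =====
-- def Mode_Memoization_BottomUp(S):
--     n = len(S)
--     memo = {}
--     def g(j, k):
--         if j == 0 or k == 0:
--             return 0
--         if (j, k) in memo:
--             return memo[(j, k)]
--         if S[j-1] == S[k-1]:
--             v = g(j-1, k) + 1
--         else:
--             v = max(g(j-1, k-1), g(j-1, k))
--         memo[(j, k)] = v
--         return v
--     return g(n, n)
-- ===== Notes on version B (the rewrite author's own statement) =====
-- stated objective: alternative
-- what changed: B replaces A's bottom-up fixed double sweep that fills a full mutable (n+1)x(n+1) table (and pprints the whole table after every cell) by demand-driven top-down memoized recursion from (n,n) with a dict, computing only the cells the result depends on (the upper triangle k >= j).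
import Mathlib
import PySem

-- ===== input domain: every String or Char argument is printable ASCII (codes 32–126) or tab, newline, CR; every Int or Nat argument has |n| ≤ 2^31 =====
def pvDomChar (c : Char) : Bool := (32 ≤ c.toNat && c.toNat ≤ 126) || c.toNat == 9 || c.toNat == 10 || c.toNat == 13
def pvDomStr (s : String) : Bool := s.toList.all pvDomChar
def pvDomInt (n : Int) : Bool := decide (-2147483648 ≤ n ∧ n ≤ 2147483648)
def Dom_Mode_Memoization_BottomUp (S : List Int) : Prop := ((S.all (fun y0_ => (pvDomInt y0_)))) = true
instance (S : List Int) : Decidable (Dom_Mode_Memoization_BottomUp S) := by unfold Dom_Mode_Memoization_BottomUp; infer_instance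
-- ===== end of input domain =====

-- B replaces A's bottom-up sweep over a full mutable (n+1)^2 table (which A also pprints
-- after every cell update — B performs no printing, a side-effect difference) by top-down
-- memoized recursion from (n,n) with a dictionary, computing only the cells the result
-- actually depends on; return values are proved equal on nonempty lists.

-- ===== PORT A =====
-- literal transliteration of A; j-1, k-1, j, k are always in range for the reads/writes,
-- so pyGetD/pySetD are exact; pprint calls are output-only and dropped.
def Mode_Memoization_BottomUp (S : List Int) : Int :=
  let n : Int := (S.length : Int)
  let M0 : List (List Int) :=
    (PySem.List.pyRange 0 (n+1) 1).map (fun _ =>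
      (PySem.List.pyRange 0 (n+1) 1).map (fun _ => (0 : Int)))
  let M := (PySem.List.pyRange 1 (n+1) 1).foldl (fun M j =>
    (PySem.List.pyRange 1 (n+1) 1).foldl (fun M k =>
      let v : Int :=
        if PySem.List.pyGetD S (j-1) 0 = PySem.List.pyGetD S (k-1) 0 then
          PySem.List.pyGetD (PySem.List.pyGetD M (j-1) []) k 0 + 1
        else
          max (PySem.List.pyGetD (PySem.List.pyGetD M (j-1) []) (k-1) 0)
              (PySem.List.pyGetD (PySem.List.pyGetD M (j-1) []) k 0)
      PySem.List.pySetD M j (PySem.List.pySetD (PySem.List.pyGetD M j []) k v)) M) M0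
  -- Python returns M[j][k] with the leaked loop variables; on S ≠ [] both equal n
  PySem.List.pyGetD (PySem.List.pyGetD M n []) n 0

-- ===== PORT B =====
-- transliteration of Source B's inner g: the counters j, k only ever hold 0..n, so they are
-- carried as Nat (which also makes the recursion structural on j); S[j-1]/S[k-1] are in
-- range on every call reached from (n,n), so getD is exact there.
def pvMemoG (S : List Int) : Nat → Nat → PySem.Dict (Nat × Nat) Int →
    Int × PySem.Dict (Nat × Nat) Int
  | 0, _, memo => (0, memo)
  | _+1, 0, memo => (0, memo)
  | j+1, k+1, memo =>
    match memo.get? (j+1, k+1) with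
    | some v => (v, memo)
    | none =>
      if S.getD j 0 = S.getD k 0 then
        let p := pvMemoG S j (k+1) memo
        let v := p.1 + 1
        (v, p.2.insert (j+1, k+1) v)
      else
        let p1 := pvMemoG S j k memo
        let p2 := pvMemoG S j (k+1) p1.2
        let v := max p1.1 p2.1
        (v, p2.2.insert (j+1, k+1) v)

def Mode_Memoization_BottomUp_alt (S : List Int) : Int :=
  let n := S.length
  (pvMemoG S n n PySem.Dict.empty).1

-- ===== PRECONDITION & SPEC =====
-- A raises NameError on the empty list (its loop variables j, k are never bound); Pre_
-- excludes exactly that input.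
def Pre_Mode_Memoization_BottomUp (S : List Int) : Prop := S ≠ []
instance (S : List Int) : Decidable (Pre_Mode_Memoization_BottomUp S) := by unfold Pre_Mode_Memoization_BottomUp; infer_instance
def pvWitness_Mode_Memoization_BottomUp : List Int := [2, 1, 2]

def Spec_Mode_Memoization_BottomUp (S : List Int) (out : Int) : Prop := out = Mode_Memoization_BottomUp_alt S
instance (S : List Int) (out : Int) : Decidable (Spec_Mode_Memoization_BottomUp S out) := by unfold Spec_Mode_Memoization_BottomUp; infer_instance

-- ===== CLAIM (what is proved, stated in full; the proofs are below) =====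
def Claim_equal_Mode_Memoization_BottomUp : Prop := ∀ (S : List Int), Dom_Mode_Memoization_BottomUp S → Pre_Mode_Memoization_BottomUp S → Spec_Mode_Memoization_BottomUp S (Mode_Memoization_BottomUp S)

-- ===== LEMMAS AND PROOFS =====

-- the common recurrence both ports compute
def mf (S : List Int) : Nat → Nat → Int
  | 0, _ => 0
  | _+1, 0 => 0
  | j+1, k+1 =>
      if S.getD j 0 = S.getD k 0 then mf S j (k+1) + 1
      else max (mf S j k) (mf S j (k+1))

lemma mf_zero_left (S : List Int) (k : Nat) : mf S 0 k = 0 := rfl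

lemma mf_zero_right (S : List Int) (j : Nat) : mf S j 0 = 0 := by cases j <;> rfl

-- range-map helpers
lemma getD_rangeMap {α : Type} [Inhabited α] (n : Nat) (f : Nat → α) (i : Nat) (d : α) :
    ((List.range n).map f).getD i d = if i < n then f i else d := by
  split_ifs with h
  · exact PySem.List.getD_map_range f n i d h
  · apply List.getD_eq_default
    simpa using Nat.le_of_not_lt h

lemma set_rangeMap {α : Type} (m : Nat) (f : Nat → α) (i : Nat) (v : α) :
    ((List.range m).map f).set i v = (List.range m).map (fun x => if x = i then v else f x) := by
  apply List.ext_getElem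
  · simp
  · intro p hp _
    simp only [List.getElem_set, List.getElem_map, List.getElem_range]
    rcases eq_or_ne i p with rfl | hne
    · simp
    · simp [hne, hne.symm]

-- A's table after processing rows < j fully and row j up to column k
def amat (S : List Int) (n j k : Nat) : List (List Int) :=
  (List.range (n+1)).map (fun j' => (List.range (n+1)).map (fun k' =>
    if j' < j ∨ (j' = j ∧ k' ≤ k) then mf S j' k' else 0))

def stepA (S : List Int) (j : Int) (M : List (List Int)) (k : Int) : List (List Int) :=
  let v : Int :=
    if PySem.List.pyGetD S (j-1) 0 = PySem.List.pyGetD S (k-1) 0 then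
      PySem.List.pyGetD (PySem.List.pyGetD M (j-1) []) k 0 + 1
    else
      max (PySem.List.pyGetD (PySem.List.pyGetD M (j-1) []) (k-1) 0)
          (PySem.List.pyGetD (PySem.List.pyGetD M (j-1) []) k 0)
  PySem.List.pySetD M j (PySem.List.pySetD (PySem.List.pyGetD M j []) k v)

lemma stepA_amat (S : List Int) (n j k : Nat) (hj1 : 1 ≤ j) (hjn : j ≤ n) (hk : k < n) :
    stepA S (j:Int) (amat S n j k) ((k:Int)+1) = amat S n j (k+1) := by
  have hj' : ((j:Int) - 1) = ((j-1 : Nat) : Int) := by omega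
  have hk1 : ((k:Int) + 1) = (((k+1:Nat)) : Int) := by omega
  have hk2 : (((k+1:Nat)) : Int) - 1 = ((k:Nat) : Int) := by omega
  have hjlt : j < n + 1 := by omega
  have hj1lt : j - 1 < n + 1 := by omega
  simp only [stepA]
  rw [hk1, hk2]
  simp only [hj', PySem.List.pyGetD_natCast, PySem.List.pySetD_natCast]
  simp only [amat, getD_rangeMap, if_pos hjlt, if_pos hj1lt]
  rw [set_rangeMap, set_rangeMap]
  apply List.map_congr_left
  intro j' hj'mem
  have hj'n : j' < n + 1 := List.mem_range.mp hj'mem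
  rcases eq_or_ne j' j with rfl | hne
  · rw [if_pos rfl]
    apply List.map_congr_left
    intro k' hk'mem
    have hk'n : k' < n + 1 := List.mem_range.mp hk'mem
    rcases eq_or_ne k' (k+1) with rfl | hkne
    · rw [if_pos rfl, if_pos (show j' < j' ∨ (j' = j' ∧ k+1 ≤ k+1) by omega)]
      rw [if_pos (show k+1 < n+1 by omega), if_pos (show k < n+1 by omega)]
      rw [if_pos (show j'-1 < j' ∨ (j'-1 = j' ∧ k+1 ≤ k) by omega)]
      rw [if_pos (show j'-1 < j' ∨ (j'-1 = j' ∧ k ≤ k) by omega)]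
      conv_rhs => rw [show j' = (j'-1)+1 by omega, mf]
    · rw [if_neg hkne]
      simp only [true_and]
      rw [if_congr (show (j' < j' ∨ k' ≤ k) ↔ (j' < j' ∨ k' ≤ k + 1) by omega) rfl rfl]
  · rw [if_neg hne]
    apply List.map_congr_left
    intro k' _
    have hiff : (j' < j ∨ (j' = j ∧ k' ≤ k)) ↔ (j' < j ∨ (j' = j ∧ k' ≤ k + 1)) := by
      constructor <;> intro h <;> rcases h with h | ⟨h1,h2⟩ <;> simp_all
    simp only [hiff]

lemma foldl_stepA (S : List Int) (n j : Nat) (hj1 : 1 ≤ j) (hjn : j ≤ n) :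
    ∀ d k, k + d = n →
      (PySem.List.pyRange ((k:Int)+1) ((n:Int)+1) 1).foldl (stepA S (j:Int)) (amat S n j k)
        = amat S n j n := by
  intro d
  induction d with
  | zero =>
    intro k hk
    rw [PySem.List.pyRange_one_eq_nil (by omega)]
    simp only [List.foldl_nil]
    rw [show k = n by omega]
  | succ d ih =>
    intro k hk
    rw [PySem.List.pyRange_one_cons (by omega)]
    simp only [List.foldl_cons]
    rw [stepA_amat S n j k hj1 hjn (by omega)]
    have := ih (k+1) (by omega)
    rw [show ((k:Int)+1+1) = (((k+1:Nat)):Int)+1 by omega]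
    exact this

lemma amat_start (S : List Int) (n j : Nat) :
    amat S n j n = amat S n (j+1) 0 := by
  unfold amat
  apply List.map_congr_left
  intro j' hj'
  apply List.map_congr_left
  intro k' hk'
  have hk'n : k' < n + 1 := List.mem_range.mp hk'
  rcases Nat.lt_trichotomy j' (j+1) with h | h | h
  · rcases Nat.lt_or_ge j' j with h2 | h2
    · rw [if_pos (Or.inl h2), if_pos (Or.inl (by omega))]
    · have : j' = j := by omega
      subst this
      rw [if_pos (Or.inr ⟨rfl, by omega⟩), if_pos (Or.inl (by omega))]
  · subst h
    rw [if_neg (by omega), eq_comm]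
    split_ifs with h3
    · rcases h3 with h3 | ⟨_, h4⟩
      · omega
      · have : k' = 0 := by omega
        subst this
        exact mf_zero_right S _
    · rfl
  · rw [if_neg (by omega), if_neg (by omega)]

def rowA (S : List Int) (n : Int) (M : List (List Int)) (j : Int) : List (List Int) :=
  (PySem.List.pyRange 1 (n+1) 1).foldl (stepA S j) M

lemma foldl_outerA (S : List Int) (n : Nat) :
    ∀ d j, j + d = n →
      (PySem.List.pyRange ((j:Int)+1) ((n:Int)+1) 1).foldl (rowA S (n:Int)) (amat S n j n)
        = amat S n n n := by
  intro d
  induction d with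
  | zero =>
    intro j hj
    obtain rfl : j = n := by omega
    rw [PySem.List.pyRange_one_eq_nil (by omega), List.foldl_nil]
  | succ d ih =>
    intro j hj
    rw [PySem.List.pyRange_one_cons (by omega), List.foldl_cons]
    have hstep : rowA S (n:Int) (amat S n j n) ((j:Int)+1) = amat S n (j+1) n := by
      unfold rowA
      rw [amat_start S n j, show ((j:Int)+1) = (((j+1:Nat)):Int) by omega]
      have h2 := foldl_stepA S n (j+1) (by omega) (by omega) n 0 (by omega)
      rw [show (((0:Nat)):Int)+1 = (1:Int) by norm_num] at h2
      exact h2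
    rw [hstep, show ((j:Int)+1+1) = (((j+1:Nat)):Int)+1 by omega]
    exact ih (j+1) (by omega)

lemma initA (S : List Int) :
    ((PySem.List.pyRange 0 ((S.length:Int)+1) 1).map (fun _ =>
      (PySem.List.pyRange 0 ((S.length:Int)+1) 1).map (fun _ => (0:Int))))
      = amat S S.length 0 S.length := by
  rw [PySem.List.pyRange_one 0 ((S.length:Int)+1),
      show (((S.length:Int)+1-0)).toNat = S.length + 1 by omega, List.map_map]
  unfold amat
  apply List.map_congr_left
  intro j' _
  rw [List.map_map]
  apply List.map_congr_left
  intro k' hk'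
  simp only [Function.comp]
  split_ifs with h
  · rcases h with h | ⟨h1, _⟩
    · omega
    · subst h1; exact (mf_zero_left S k').symm
  · rfl

lemma portA_eq (S : List Int) : Mode_Memoization_BottomUp S = mf S S.length S.length := by
  have h0 : Mode_Memoization_BottomUp S =
      PySem.List.pyGetD (PySem.List.pyGetD
        ((PySem.List.pyRange 1 ((S.length:Int)+1) 1).foldl (rowA S (S.length:Int))
          ((PySem.List.pyRange 0 ((S.length:Int)+1) 1).map (fun _ =>
            (PySem.List.pyRange 0 ((S.length:Int)+1) 1).map (fun _ => (0:Int)))))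
        (S.length:Int) []) (S.length:Int) 0 := rfl
  rw [h0, initA]
  have hout := foldl_outerA S S.length S.length 0 (by omega)
  rw [show (((0:Nat)):Int)+1 = (1:Int) by norm_num] at hout
  rw [hout]
  simp only [amat, PySem.List.pyGetD_natCast, getD_rangeMap,
    if_pos (Nat.lt_succ_self S.length)]
  simp

-- B-side: the memo only ever stores correct values of mf
def pvMemoInv (S : List Int) (m : PySem.Dict (Nat × Nat) Int) : Prop :=
  ∀ j k v, m.get? (j, k) = some v → v = mf S j k

lemma pvMemoG_correct (S : List Int) :
    ∀ j k m, pvMemoInv S m →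
      (pvMemoG S j k m).1 = mf S j k ∧ pvMemoInv S (pvMemoG S j k m).2 := by
  intro j
  induction j with
  | zero =>
    intro k m hm
    exact ⟨by simp [pvMemoG, mf_zero_left], by simpa [pvMemoG] using hm⟩
  | succ j ih =>
    intro k m hm
    cases k with
    | zero =>
      exact ⟨by simp [pvMemoG, mf_zero_right], by simpa [pvMemoG] using hm⟩
    | succ k =>
      simp only [pvMemoG]
      cases hget : m.get? (j+1, k+1) with
      | some v =>
        exact ⟨hm _ _ _ hget, hm⟩
      | none =>
        simp only [mf]
        split_ifs with hEq
        · obtain ⟨h1, h2⟩ := ih (k+1) m hm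
          refine ⟨by simp [h1], ?_⟩
          intro j' k' v' hv'
          rw [PySem.Dict.get?_insert] at hv'
          split_ifs at hv' with hk'
          · obtain ⟨rfl, rfl⟩ := Prod.mk.injEq .. ▸ (by
              simpa using hk' : j' = j + 1 ∧ k' = k + 1)
            simp only [Option.some.injEq] at hv'
            rw [← hv', h1, mf, if_pos hEq]
          · exact h2 _ _ _ hv'
        · obtain ⟨h1, h2⟩ := ih k m hm
          obtain ⟨h3, h4⟩ := ih (k+1) _ h2
          refine ⟨by simp [h1, h3], ?_⟩
          intro j' k' v' hv'
          rw [PySem.Dict.get?_insert] at hv'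
          split_ifs at hv' with hk'
          · obtain ⟨rfl, rfl⟩ := (by simpa using hk' : j' = j + 1 ∧ k' = k + 1)
            simp only [Option.some.injEq] at hv'
            rw [← hv', h1, h3, mf, if_neg hEq]
          · exact h4 _ _ _ hv'

lemma portB_eq (S : List Int) : Mode_Memoization_BottomUp_alt S = mf S S.length S.length := by
  have h := pvMemoG_correct S S.length S.length PySem.Dict.empty
    (by intro j k v hv; simp [PySem.Dict.get?_empty] at hv)
  exact h.1

-- ===== VERDICT (by name: the statement is the Claim_ definition above) =====
theorem Mode_Memoization_BottomUp_spec : Claim_equal_Mode_Memoization_BottomUp := by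
  intro S _ _
  unfold Spec_Mode_Memoization_BottomUp
  exact (portA_eq S).trans (portB_eq S).symm
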